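-- pv_equiv track=rewrite | github.com/jshiucode/Cypress | Gordian2 - Local/helpers.py | seperate_cycles
-- ===== SOURCE A (Python) =====
-- def seperate_cycles(edges):
--     # Create a dictionary to represent the graph
--     graph = {}
--     for edge in edges:
--         u, v = edge
--         if u not in graph:
--             graph[u] = []
--         if v not in graph:
--             graph[v] = []
--         graph[u].append(v)
--         graph[v].append(u)
--
--     # Perform a depth-first search to find cycles
--     def dfs(node, visited, cycle):
--         visited[node] = True
--         cycle.append(node)
--         for neighbor in graph[node]:
--             if not visited[neighbor]:
--                 dfs(neighbor, visited, cycle)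
--
--     # Initialize variables
--     visited = {node: False for node in graph}
--     cycles = []
--
--     # Iterate through all nodes
--     for node in graph:
--         if not visited[node]:
--             cycle = []
--             dfs(node, visited, cycle)
--             cycles.append(cycle)
--
--     if len(cycles) > 2:
--         raise Exception("MORE THAN TWO CYCLES CREATED")
--
--     if len(cycles) < 2:
--         raise Exception("ONLY ONE CYCLE CREATED")
--
--     #append extra vertex to complete the cycle
--     cycles[0].append(cycles[0][0])
--     cycles[1].append(cycles[1][0])
--
--     return cycles[0], cycles[1]
-- ===== SOURCE B (Python) =====
-- def seperate_cycles(edges):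
--     # Same adjacency-dict construction (duplicate neighbors and insertion order preserved)
--     graph = {}
--     for u, v in edges:
--         graph.setdefault(u, []).append(v)
--         graph.setdefault(v, []).append(u)
--
--     visited = {node: False for node in graph}
--     cycles = []
--     for start in graph:
--         if not visited[start]:
--             cycle = []
--             stack = [start]
--             while stack:
--                 node = stack.pop()
--                 if visited[node]:
--                     continue
--                 visited[node] = True
--                 cycle.append(node)
--                 for neighbor in reversed(graph[node]):
--                     stack.append(neighbor)
--             cycles.append(cycle)
--
--     if len(cycles) > 2:
--         raise Exception("MORE THAN TWO CYCLES CREATED")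
--
--     if len(cycles) < 2:
--         raise Exception("ONLY ONE CYCLE CREATED")
--
--     cycles[0].append(cycles[0][0])
--     cycles[1].append(cycles[1][0])
--
--     return cycles[0], cycles[1]
-- ===== Notes on version B (the rewrite author's own statement) =====
-- stated objective: idiomatic
-- what changed: The recursive dfs helper is replaced by an iterative explicit-stack DFS (pop, skip if visited, push neighbors in reverse so the preorder matches), and the adjacency dict is built with setdefault(...).append(...) instead of membership-guarded initialization; the >2/<2 component guards and final cycle-closing append are kept.
import Mathlib
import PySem

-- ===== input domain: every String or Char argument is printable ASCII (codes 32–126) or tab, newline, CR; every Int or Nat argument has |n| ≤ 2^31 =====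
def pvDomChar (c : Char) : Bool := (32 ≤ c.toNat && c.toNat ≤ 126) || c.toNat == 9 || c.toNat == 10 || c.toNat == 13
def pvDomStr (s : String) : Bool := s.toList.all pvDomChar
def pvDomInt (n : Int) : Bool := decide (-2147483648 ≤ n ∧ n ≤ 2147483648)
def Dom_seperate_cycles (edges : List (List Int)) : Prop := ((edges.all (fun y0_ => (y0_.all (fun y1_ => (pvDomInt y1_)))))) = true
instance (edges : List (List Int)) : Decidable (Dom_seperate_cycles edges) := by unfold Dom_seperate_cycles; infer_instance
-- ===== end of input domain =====

-- B replaces A's recursive dfs helper with an iterative explicit-stack DFS producing the same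
-- preorder, and builds the adjacency dict with setdefault/append; objective: idiomatic, same cost.
-- (A mutates nothing observable; the equivalence is about the return value.)

-- ===== PORT A =====

-- Python: 'u, v = edge' raises ValueError unless len(edge) == 2; excluded by Pre_ (the '_ => g' arm).
def pvAdjStepA (g : PySem.Dict Int (List Int)) (e : List Int) : PySem.Dict Int (List Int) :=
  match e with
  | [u, v] =>
    let g1 := if g.contains u then g else g.insert u []
    let g2 := if g1.contains v then g1 else g1.insert v []
    let g3 := g2.insert u (g2.getD u [] ++ [v])       -- graph[u].append(v)
    g3.insert v (g3.getD v [] ++ [u])                 -- graph[v].append(u)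
  | _ => g

def pvGraphA (edges : List (List Int)) : PySem.Dict Int (List Int) :=
  edges.foldl pvAdjStepA PySem.Dict.empty

-- visited = {node: False for node in graph}
def pvInitVisA (g : PySem.Dict Int (List Int)) : PySem.Dict Int Bool :=
  g.keys.foldl (fun d k => d.insert k false) PySem.Dict.empty

-- Python's recursive dfs; the fuel only makes the recursion structural — it is never exhausted
-- when called with fuel = number of nodes, since every level marks one unvisited node visited.
-- 'visited[neighbor]' always finds its key (neighbors are keys by construction); default true.
mutual
def pvDfsA (g : PySem.Dict Int (List Int)) : Nat → Int → PySem.Dict Int Bool → List Int → PySem.Dict Int Bool × List Int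
  | 0, _, vis, cyc => (vis, cyc)
  | fuel+1, node, vis, cyc => pvDfsNbrsA g fuel (g.getD node []) (vis.insert node true) (cyc ++ [node])
  termination_by fuel _ _ _ => (fuel, 0, 0)

def pvDfsNbrsA (g : PySem.Dict Int (List Int)) : Nat → List Int → PySem.Dict Int Bool → List Int → PySem.Dict Int Bool × List Int
  | _, [], vis, cyc => (vis, cyc)
  | fuel, nb :: rest, vis, cyc =>
    if (vis.getD nb true) = false then
      let p := pvDfsA g fuel nb vis cyc
      pvDfsNbrsA g fuel rest p.1 p.2
    else pvDfsNbrsA g fuel rest vis cyc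
  termination_by fuel lst _ _ => (fuel, 1, lst.length)
end

def seperate_cycles (edges : List (List Int)) : List Int × List Int :=
  let g := pvGraphA edges
  let st := g.keys.foldl (fun (st : PySem.Dict Int Bool × List (List Int)) node =>
      if (st.1.getD node true) = false then
        let p := pvDfsA g g.size node st.1 []
        (p.1, st.2 ++ [p.2])
      else st) (pvInitVisA g, [])
  match st.2 with
  | [c1, c2] => (c1 ++ [c1.headD 0], c2 ++ [c2.headD 0])   -- cycles nonempty; append cycles[i][0]
  | _ => ([], [])    -- Python raises ("MORE THAN TWO"/"ONLY ONE" cycles); excluded by Pre_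

-- ===== PORT B =====

-- graph.setdefault(u, []).append(v)  ==  Dict.modify u [] (· ++ [v])
def pvAdjStepB (g : PySem.Dict Int (List Int)) (e : List Int) : PySem.Dict Int (List Int) :=
  match e with
  | [u, v] => (g.modify u [] (· ++ [v])).modify v [] (· ++ [u])
  | _ => g    -- ValueError on unpacking, as in A; excluded by Pre_

def pvGraphB (edges : List (List Int)) : PySem.Dict Int (List Int) :=
  edges.foldl pvAdjStepB PySem.Dict.empty

def pvInitVisB (g : PySem.Dict Int (List Int)) : PySem.Dict Int Bool :=
  g.keys.foldl (fun d k => d.insert k false) PySem.Dict.empty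

-- number of False entries of the visited dict: termination measure of the while loop
def pvCF (d : PySem.Dict Int Bool) : Nat := d.items.countP (fun p => p.2 == false)

theorem pv_countP_map_le (k : Int) (l : List (Int × Bool)) :
    (l.map (fun p => if p.1 == k then (k, true) else p)).countP (fun p => p.2 == false)
      ≤ l.countP (fun p => p.2 == false) := by
  rw [List.countP_map]
  apply List.countP_mono_left
  intro a _ h
  by_cases hk : a.1 == k <;> simp [hk, Function.comp] at h ⊢ <;> simp_all

theorem pv_countP_map_lt (k : Int) : ∀ (l : List (Int × Bool)) (a : Int),
    l.find? (fun p => p.1 == k) = some (a, false) →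
    (l.map (fun p => if p.1 == k then (k, true) else p)).countP (fun p => p.2 == false)
      < l.countP (fun p => p.2 == false) := by
  intro l
  induction l with
  | nil => intro a h; simp at h
  | cons p t ih =>
    intro a h
    by_cases hk : p.1 == k
    · rw [List.find?_cons_of_pos (by simp [hk])] at h
      injection h with h'
      subst h'
      have hle := pv_countP_map_le k t
      simp only [List.map_cons, List.countP_cons, hk, if_pos]
      simp only [List.countP_map] at hle ⊢
      simp at hle ⊢
      omega
    · rw [List.find?_cons_of_neg (by simp [hk])] at h
      have hlt := ih a h
      simp only [List.map_cons, List.countP_cons, hk]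
      simp only [List.countP_map] at hlt ⊢
      simp at hlt ⊢
      omega

theorem pvCF_insert_true_lt (d : PySem.Dict Int Bool) (k : Int)
    (h : d.getD k true = false) : pvCF (d.insert k true) < pvCF d := by
  have hg : d.get? k = some false := by
    unfold PySem.Dict.getD at h
    cases hq : d.get? k with
    | none => rw [hq] at h; exact absurd h (by simp)
    | some b => rw [hq] at h; simp only [Option.getD_some] at h; rw [h]
  obtain ⟨p, hp, hp2⟩ : ∃ p, d.items.find? (fun p => p.1 == k) = some p ∧ p.2 = false := by
    unfold PySem.Dict.get? at hg
    cases hf : d.items.find? (fun p => p.1 == k) with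
    | none => rw [hf] at hg; simp at hg
    | some p => rw [hf] at hg; simp at hg; exact ⟨p, rfl, hg⟩
  have hc : d.contains k = true := by
    unfold PySem.Dict.contains
    exact List.any_eq_true.mpr ⟨p, List.mem_of_find?_eq_some hp, by simpa using List.find?_some hp⟩
  unfold PySem.Dict.insert pvCF
  rw [hc]
  simp only [if_true]
  exact pv_countP_map_lt k d.items p.1 (by rw [hp]; cases p; simp at hp2; simp [hp2])

-- the while loop over the explicit stack; the stack is modeled head-as-top, so
-- 'for neighbor in reversed(graph[node]): stack.append(neighbor)' is 'graph[node] ++ rest'.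
def pvStackB (g : PySem.Dict Int (List Int)) (vis : PySem.Dict Int Bool)
    (stack : List Int) (cyc : List Int) : PySem.Dict Int Bool × List Int :=
  match stack with
  | [] => (vis, cyc)
  | node :: rest =>
    if h : (vis.getD node true) = false then
      pvStackB g (vis.insert node true) (g.getD node [] ++ rest) (cyc ++ [node])
    else pvStackB g vis rest cyc
  termination_by (pvCF vis, stack.length)
  decreasing_by
  · exact Prod.Lex.left _ _ (pvCF_insert_true_lt vis node h)
  · exact Prod.Lex.right _ (by simp)

def seperate_cycles_alt (edges : List (List Int)) : List Int × List Int :=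
  let g := pvGraphB edges
  let st := g.keys.foldl (fun (st : PySem.Dict Int Bool × List (List Int)) node =>
      if (st.1.getD node true) = false then
        let p := pvStackB g st.1 [node] []
        (p.1, st.2 ++ [p.2])
      else st) (pvInitVisB g, [])
  match st.2 with
  | [c1, c2] => (c1 ++ [c1.headD 0], c2 ++ [c2.headD 0])
  | _ => ([], [])    -- same guards as A: raise unless exactly two components

-- ===== PRECONDITION & SPEC =====

-- union-find by partition merging, independent of both ports: used only to state Pre_
def pvGroupAdd (gs : List (List Int)) (n : Int) : List (List Int) :=
  if gs.any (fun grp => grp.contains n) then gs else gs ++ [[n]]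

def pvComponents (edges : List (List Int)) : Nat :=
  (edges.foldl (fun gs e =>
    match e with
    | [u, v] =>
      let gs := pvGroupAdd (pvGroupAdd gs u) v
      let gu := (gs.find? (fun grp => grp.contains u)).getD []
      let gv := (gs.find? (fun grp => grp.contains v)).getD []
      if gu = gv then gs else gs.filter (fun grp => grp ≠ gu && grp ≠ gv) ++ [gu ++ gv]
    | _ => gs) []).length

-- Pre_ excludes exactly the inputs on which A raises: an edge whose length is not 2 (ValueError on
-- unpacking) and edge lists whose number of connected components is not 2 (A's explicit Exceptions).
def Pre_seperate_cycles (edges : List (List Int)) : Prop :=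
  (edges.all (fun e => e.length == 2)) = true ∧ pvComponents edges = 2

instance (edges : List (List Int)) : Decidable (Pre_seperate_cycles edges) := by
  unfold Pre_seperate_cycles; infer_instance

def pvWitness_seperate_cycles : List (List Int) := [[1, 2], [3, 4]]

def Spec_seperate_cycles (edges : List (List Int)) (out : List Int × List Int) : Prop := out = seperate_cycles_alt edges
instance (edges : List (List Int)) (out : List Int × List Int) : Decidable (Spec_seperate_cycles edges out) := by unfold Spec_seperate_cycles; infer_instance

-- ===== CLAIM (what is proved, stated in full; the proofs are below) =====
def Claim_equal_seperate_cycles : Prop := ∀ (edges : List (List Int)), Dom_seperate_cycles edges → Pre_seperate_cycles edges → Spec_seperate_cycles edges (seperate_cycles edges)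

-- ===== LEMMAS AND PROOFS =====

-- inserting at a present key commutes with inserting at a different key
theorem pv_insert_comm (d : PySem.Dict Int (List Int)) (u v : Int) (w x : List Int)
    (huv : u ≠ v) (hu : d.contains u = true) :
    (d.insert v x).insert u w = (d.insert u w).insert v x := by
  have hcu' : (d.insert v x).contains u = true := by
    rw [PySem.Dict.contains_insert]; simp [hu]
  by_cases hv : d.contains v = true
  · have hcv' : (d.insert u w).contains v = true := by
      rw [PySem.Dict.contains_insert]; simp [hv]
    apply PySem.Dict.ext
    rw [PySem.Dict.items_insert_of_contains _ _ hcu',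
        PySem.Dict.items_insert_of_contains _ _ hv,
        PySem.Dict.items_insert_of_contains _ _ hcv',
        PySem.Dict.items_insert_of_contains _ _ hu]
    simp only [List.map_map]
    apply List.map_congr_left
    intro p _
    by_cases h1 : p.1 = u <;> by_cases h2 : p.1 = v <;>
      simp [Function.comp, h1, h2, huv, Ne.symm huv] <;> simp_all
  · simp only [Bool.not_eq_true] at hv
    have hv' : (d.insert u w).contains v = false := by
      rw [PySem.Dict.contains_insert]; simp [hv, Ne.symm huv]
    apply PySem.Dict.ext
    rw [PySem.Dict.items_insert_of_contains _ _ hcu',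
        PySem.Dict.items_insert_of_not_contains _ _ hv,
        PySem.Dict.items_insert_of_not_contains _ _ hv',
        PySem.Dict.items_insert_of_contains _ _ hu]
    simp [Ne.symm huv]

theorem pv_step_eq (g : PySem.Dict Int (List Int)) (e : List Int) :
    pvAdjStepA g e = pvAdjStepB g e := by
  match e with
  | [] => rfl
  | [_] => rfl
  | _ :: _ :: _ :: _ => rfl
  | [u, v] =>
    show (let g1 := if g.contains u then g else g.insert u []
          let g2 := if g1.contains v then g1 else g1.insert v []
          let g3 := g2.insert u (g2.getD u [] ++ [v])
          g3.insert v (g3.getD v [] ++ [u]))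
        = (g.modify u [] (· ++ [v])).modify v [] (· ++ [u])
    unfold PySem.Dict.modify
    by_cases huv : u = v
    · subst huv
      by_cases hcu : g.contains u = true
      · simp only [hcu, if_true]
      · have hcu' : g.contains u = false := by simpa using hcu
        simp only [hcu', Bool.false_eq_true, if_false, PySem.Dict.contains_insert_self,
          if_true, PySem.Dict.getD_insert_self, PySem.Dict.insert_insert_self,
          PySem.Dict.getD_of_not_contains _ _ hcu', List.nil_append]
    · have hvu : v ≠ u := Ne.symm huv
      by_cases hcu : g.contains u = true <;> by_cases hcv : g.contains v = true
      · -- both present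
        simp only [hcu, hcv, if_true,
          PySem.Dict.getD_insert_of_ne _ _ _ hvu]
      · -- u present, v absent
        have hcv' : g.contains v = false := by simpa using hcv
        have h1 : (g.insert v ([] : List Int)).contains v = true := PySem.Dict.contains_insert_self _ _ _
        simp only [hcu, if_true, hcv', Bool.false_eq_true, if_false, h1,
          PySem.Dict.getD_insert_of_ne _ _ _ huv, PySem.Dict.getD_insert_self,
          PySem.Dict.getD_of_not_contains _ _ hcv', List.nil_append]
        rw [pv_insert_comm _ _ _ _ _ huv hcu,
            PySem.Dict.getD_insert_of_ne _ _ _ hvu, PySem.Dict.getD_insert_self,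
            PySem.Dict.insert_insert_self]
        rw [PySem.Dict.getD_of_not_contains _ ([] : List Int) hcv']
      · -- u absent, v present
        have hcu' : g.contains u = false := by simpa using hcu
        have h1 : (g.insert u ([] : List Int)).contains v = true := by
          rw [PySem.Dict.contains_insert]; simp [hcv]
        simp only [hcu', Bool.false_eq_true, if_false, h1, if_true,
          PySem.Dict.getD_insert_self, PySem.Dict.getD_insert_of_ne _ _ _ hvu,
          PySem.Dict.insert_insert_self,
          PySem.Dict.getD_of_not_contains _ _ hcu', List.nil_append]
      · -- both absent
        have hcu' : g.contains u = false := by simpa using hcu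
        have hcv' : g.contains v = false := by simpa using hcv
        have h1 : (g.insert u ([] : List Int)).contains v = false := by
          rw [PySem.Dict.contains_insert]; simp [hcv', hvu]
        simp only [hcu', hcv', Bool.false_eq_true, if_false, h1,
          PySem.Dict.getD_insert_of_ne _ _ _ huv, PySem.Dict.getD_insert_of_ne _ _ _ hvu,
          PySem.Dict.getD_insert_self,
          PySem.Dict.getD_of_not_contains _ _ hcu', PySem.Dict.getD_of_not_contains _ _ hcv',
          List.nil_append]
        rw [pv_insert_comm _ _ _ _ _ huv (PySem.Dict.contains_insert_self _ _ _)]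
        rw [PySem.Dict.insert_insert_self, PySem.Dict.insert_insert_self]

theorem pv_graph_eq (edges : List (List Int)) : pvGraphA edges = pvGraphB edges := by
  unfold pvGraphA pvGraphB
  congr 1
  funext g e
  exact pv_step_eq g e

theorem pvCF_insert_true_le (d : PySem.Dict Int Bool) (k : Int) :
    pvCF (d.insert k true) ≤ pvCF d := by
  unfold pvCF PySem.Dict.insert
  by_cases hc : d.contains k = true
  · rw [hc]
    simp only [if_true]
    exact pv_countP_map_le k d.items
  · simp only [hc]
    simp [List.countP_append]

theorem pvCF_pos (d : PySem.Dict Int Bool) (k : Int) (h : d.getD k true = false) :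
    1 ≤ pvCF d := lt_of_le_of_lt (Nat.zero_le _) (pvCF_insert_true_lt d k h)

-- monotonicity of the false-count through the recursive DFS
theorem pvM (g : PySem.Dict Int (List Int)) : ∀ fuel : Nat,
    (∀ node vis cyc, pvCF (pvDfsA g fuel node vis cyc).1 ≤ pvCF vis)
    ∧ (∀ lst vis cyc, pvCF (pvDfsNbrsA g fuel lst vis cyc).1 ≤ pvCF vis) := by
  intro fuel
  induction fuel with
  | zero =>
    constructor
    · intro node vis cyc; rw [pvDfsA]
    · intro lst
      induction lst with
      | nil => intro vis cyc; rw [pvDfsNbrsA]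
      | cons nb rest ih =>
        intro vis cyc
        rw [pvDfsNbrsA]
        split
        · exact le_trans (ih _ _) (by rw [pvDfsA])
        · exact ih _ _
  | succ f ihf =>
    have hdfs : ∀ node vis cyc, pvCF (pvDfsA g (f+1) node vis cyc).1 ≤ pvCF vis := by
      intro node vis cyc
      rw [pvDfsA]
      exact le_trans (ihf.2 _ _ _) (pvCF_insert_true_le _ _)
    refine ⟨hdfs, ?_⟩
    intro lst
    induction lst with
    | nil => intro vis cyc; rw [pvDfsNbrsA]
    | cons nb rest ih =>
      intro vis cyc
      rw [pvDfsNbrsA]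
      split
      · exact le_trans (ih _ _) (hdfs _ _ _)
      · exact ih _ _

-- the explicit-stack loop replays the recursive DFS: popping an unvisited 'node' is exactly
-- running the recursive dfs on it, provided fuel bounds the number of unvisited nodes
theorem pvP (g : PySem.Dict Int (List Int)) : ∀ fuel : Nat,
    (∀ node vis cyc stack, pvCF vis ≤ fuel → vis.getD node true = false →
      pvStackB g vis (node :: stack) cyc
        = pvStackB g (pvDfsA g fuel node vis cyc).1 stack (pvDfsA g fuel node vis cyc).2)
    ∧ (∀ lst vis cyc stack, pvCF vis ≤ fuel →
      pvStackB g vis (lst ++ stack) cyc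
        = pvStackB g (pvDfsNbrsA g fuel lst vis cyc).1 stack (pvDfsNbrsA g fuel lst vis cyc).2) := by
  intro fuel
  induction fuel with
  | zero =>
    have hdfs0 : ∀ node vis cyc stack, pvCF vis ≤ 0 → vis.getD node true = false →
        pvStackB g vis (node :: stack) cyc
          = pvStackB g (pvDfsA g 0 node vis cyc).1 stack (pvDfsA g 0 node vis cyc).2 := by
      intro node vis cyc stack h0 hf
      exact absurd (pvCF_pos vis node hf) (by omega)
    refine ⟨hdfs0, ?_⟩
    intro lst
    induction lst with
    | nil => intro vis cyc stack h0; rw [pvDfsNbrsA]; simp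
    | cons nb rest ih =>
      intro vis cyc stack h0
      have hnb : ¬ vis.getD nb true = false := fun hf => absurd (pvCF_pos vis nb hf) (by omega)
      rw [pvDfsNbrsA]
      rw [if_neg hnb]
      rw [List.cons_append, pvStackB, dif_neg hnb]
      exact ih vis cyc stack h0
  | succ f ihf =>
    have hdfs : ∀ node vis cyc stack, pvCF vis ≤ f + 1 → vis.getD node true = false →
        pvStackB g vis (node :: stack) cyc
          = pvStackB g (pvDfsA g (f+1) node vis cyc).1 stack (pvDfsA g (f+1) node vis cyc).2 := by
      intro node vis cyc stack hle hf
      rw [pvStackB, dif_pos hf, pvDfsA]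
      have hlt := pvCF_insert_true_lt vis node hf
      exact ihf.2 (g.getD node []) (vis.insert node true) (cyc ++ [node]) stack (by omega)
    refine ⟨hdfs, ?_⟩
    intro lst
    induction lst with
    | nil => intro vis cyc stack hle; rw [pvDfsNbrsA]; simp
    | cons nb rest ih =>
      intro vis cyc stack hle
      rw [pvDfsNbrsA, List.cons_append]
      by_cases hnb : vis.getD nb true = false
      · rw [if_pos hnb]
        have h1 := hdfs nb vis cyc (rest ++ stack) hle hnb
        rw [h1]
        have h2 := (pvM g (f+1)).1 nb vis cyc
        exact ih (pvDfsA g (f+1) nb vis cyc).1 (pvDfsA g (f+1) nb vis cyc).2 stack (by omega)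
      · rw [if_neg hnb, pvStackB, dif_neg hnb]
        exact ih vis cyc stack hle

theorem pv_len_foldl_insert : ∀ (ks : List Int) (d : PySem.Dict Int Bool),
    (ks.foldl (fun d k => d.insert k false) d).size ≤ d.size + ks.length := by
  intro ks
  induction ks with
  | nil => intro d; simp
  | cons k ks ih =>
    intro d
    have h1 := ih (d.insert k false)
    have h2 : (d.insert k false).size ≤ d.size + 1 := by
      rw [PySem.Dict.size_insert]; split <;> omega
    simp only [List.foldl_cons]
    calc (ks.foldl (fun d k => d.insert k false) (d.insert k false)).size
        ≤ (d.insert k false).size + ks.length := h1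
      _ ≤ d.size + (k :: ks).length := by simp [List.length_cons]; omega

theorem pvCF_init_le (g : PySem.Dict Int (List Int)) : pvCF (pvInitVisA g) ≤ g.size := by
  have h1 : pvCF (pvInitVisA g) ≤ (pvInitVisA g).size := List.countP_le_length
  have h2 := pv_len_foldl_insert g.keys PySem.Dict.empty
  have h3 : g.keys.length = g.size := by
    simp [PySem.Dict.keys, PySem.Dict.size]
  have h4 : (PySem.Dict.empty : PySem.Dict Int Bool).size = 0 := rfl
  unfold pvInitVisA
  unfold pvInitVisA at h1
  omega

theorem pv_fold_eq (g : PySem.Dict Int (List Int)) :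
    ∀ (ks : List Int) (vis : PySem.Dict Int Bool) (cycles : List (List Int)),
    pvCF vis ≤ g.size →
    ks.foldl (fun (st : PySem.Dict Int Bool × List (List Int)) node =>
      if (st.1.getD node true) = false then
        let p := pvDfsA g g.size node st.1 []
        (p.1, st.2 ++ [p.2])
      else st) (vis, cycles)
    = ks.foldl (fun (st : PySem.Dict Int Bool × List (List Int)) node =>
      if (st.1.getD node true) = false then
        let p := pvStackB g st.1 [node] []
        (p.1, st.2 ++ [p.2])
      else st) (vis, cycles) := by
  intro ks
  induction ks with
  | nil => intro vis cycles _; rfl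
  | cons k ks ih =>
    intro vis cycles hle
    simp only [List.foldl_cons]
    by_cases hk : vis.getD k true = false
    · have hstack := (pvP g g.size).1 k vis [] [] hle hk
      have hval : pvStackB g vis [k] []
          = ((pvDfsA g g.size k vis []).1, (pvDfsA g g.size k vis []).2) := by
        rw [hstack, pvStackB]
      simp only [if_pos hk, hval]
      exact ih _ _ (le_trans ((pvM g g.size).1 k vis []) hle)
    · simp only [if_neg hk]
      exact ih vis cycles hle

theorem pv_main (edges : List (List Int)) : seperate_cycles edges = seperate_cycles_alt edges := by
  simp only [seperate_cycles, seperate_cycles_alt]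
  rw [← pv_graph_eq]
  have hinit : pvInitVisB = pvInitVisA := rfl
  rw [hinit]
  rw [pv_fold_eq (pvGraphA edges) _ _ _ (pvCF_init_le (pvGraphA edges))]

-- ===== VERDICT (by name: the statement is the Claim_ definition above) =====
theorem seperate_cycles_spec : Claim_equal_seperate_cycles := by
  intro edges _ _
  unfold Spec_seperate_cycles
  exact pv_main edges
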